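-- pv_equiv track=rewrite | github.com/limse10/scvu-git-tutorial | HW3/hw03_jinrong.py | has_seven
-- ===== SOURCE A (Python) =====
-- def has_seven(k):
--     """Returns True if at least one of the digits of k is a 7, False otherwise.
--
--     >>> has_seven(3)
--     False
--     >>> has_seven(7)
--     True
--     >>> has_seven(2734)
--     True
--     >>> has_seven(2634)
--     False
--     >>> has_seven(734)
--     True
--     >>> has_seven(7777)
--     True
--     >>> from construct_check import check
--     >>> check(HW_SOURCE_FILE, 'has_seven',
--     ...       ['Assign', 'AugAssign'])
--     True
--     """
--     "*** YOUR CODE HERE ***"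
--     allbutlast, last = k // 10, k % 10
--     if allbutlast > 1 or last == 7:
--         if last == 7:
--             return True
--         else:
--             return has_seven(allbutlast)
--     else:
--         return False
-- ===== SOURCE B (Python) =====
-- def has_seven(k):
--     """Iterative reformulation: loop over the digits with divmod instead of recursing."""
--     ab, last = divmod(k, 10)
--     while True:
--         if last == 7:
--             return True
--         if ab <= 1:
--             return False
--         ab, last = divmod(ab, 10)
-- ===== Notes on version B (the rewrite author's own statement) =====
-- stated objective: alternative
-- what changed: Replaces A's tail recursion with an explicit while-loop over the digits, checking the 7-digit first and using the ab <= 1 stop condition (so negatives terminate identically).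
import Mathlib
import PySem

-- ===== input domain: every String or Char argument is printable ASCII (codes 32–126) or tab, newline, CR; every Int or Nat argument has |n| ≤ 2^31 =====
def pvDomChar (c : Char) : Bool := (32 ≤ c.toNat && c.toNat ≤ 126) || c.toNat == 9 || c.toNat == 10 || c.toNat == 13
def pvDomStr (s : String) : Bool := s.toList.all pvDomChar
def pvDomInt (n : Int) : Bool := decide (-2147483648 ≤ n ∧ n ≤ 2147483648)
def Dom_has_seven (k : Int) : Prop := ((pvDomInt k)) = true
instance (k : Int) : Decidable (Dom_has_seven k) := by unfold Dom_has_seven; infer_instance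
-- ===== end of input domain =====

-- B replaces A's tail recursion with an explicit digit loop (divmod-style helper); same cost, different decomposition.


-- ===== PORT A =====
-- literal transliteration of A's recursion
def has_seven (k : Int) : Bool :=
  let allbutlast := PySem.Int.floordiv k 10
  let last := PySem.Int.mod k 10
  if hc : allbutlast > 1 ∨ last == 7 then
    if last == 7 then true else has_seven allbutlast
  else
    false
termination_by k.natAbs
decreasing_by
  have h := PySem.Int.floordiv_mul_add_mod k 10
  have h1 := PySem.Int.mod_nonneg k (b := 10) (by omega)
  have h2 := PySem.Int.mod_lt k (b := 10) (by omega)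
  rename_i h7
  simp only [beq_iff_eq] at hc h7
  omega

-- ===== PORT B =====
-- the while-True loop of Source B, state (ab, last)
def hasSevenLoop (ab last : Int) : Bool :=
  if last == 7 then true
  else if hab : ab ≤ 1 then false
  else hasSevenLoop (PySem.Int.floordiv ab 10) (PySem.Int.mod ab 10)
termination_by ab.natAbs
decreasing_by
  have h := PySem.Int.floordiv_mul_add_mod ab 10
  have h1 := PySem.Int.mod_nonneg ab (b := 10) (by omega)
  have h2 := PySem.Int.mod_lt ab (b := 10) (by omega)
  omega

def has_seven_alt (k : Int) : Bool :=
  hasSevenLoop (PySem.Int.floordiv k 10) (PySem.Int.mod k 10)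

-- ===== PRECONDITION & SPEC =====
def Spec_has_seven (k : Int) (out : Bool) : Prop := out = has_seven_alt k
instance (k : Int) (out : Bool) : Decidable (Spec_has_seven k out) := by unfold Spec_has_seven; infer_instance

-- ===== CLAIM (what is proved, stated in full; the proofs are below) =====
def Claim_equal_has_seven : Prop := ∀ (k : Int), Dom_has_seven k → Spec_has_seven k (has_seven k)

-- ===== LEMMAS AND PROOFS =====
theorem has_seven_eq_loop (n : Nat) : ∀ k : Int, k.natAbs = n →
    has_seven k = hasSevenLoop (PySem.Int.floordiv k 10) (PySem.Int.mod k 10) := by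
  induction n using Nat.strong_induction_on with
  | _ n ih =>
    intro k hk
    conv_lhs => rw [has_seven.eq_def]
    conv_rhs => rw [hasSevenLoop.eq_def]
    have hme : PySem.Int.mod k 10 = k % 10 := PySem.Int.mod_eq_emod_of_pos (by omega)
    by_cases h7 : PySem.Int.mod k 10 = 7
    · have h7' : (PySem.Int.mod k 10 == 7) = true := by simp [hme ▸ h7]
      rw [dif_pos (Or.inr h7'), if_pos h7', if_pos h7']
    · have h7' : ¬ (PySem.Int.mod k 10 == 7) = true := by simp [hme ▸ h7]
      rw [if_neg h7']
      by_cases hab : PySem.Int.floordiv k 10 > 1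
      · have h := PySem.Int.floordiv_mul_add_mod k 10
        have h1 := PySem.Int.mod_nonneg k (b := 10) (by omega)
        have h2 := PySem.Int.mod_lt k (b := 10) (by omega)
        have hlt : (PySem.Int.floordiv k 10).natAbs < n := by omega
        rw [dif_pos (Or.inl hab), if_neg h7',
          dif_neg (by omega : ¬ PySem.Int.floordiv k 10 ≤ 1)]
        exact ih _ hlt _ rfl
      · rw [dif_neg (by simp only [not_or]; exact ⟨hab, h7'⟩), dif_pos (by omega)]

-- ===== VERDICT (by name: the statement is the Claim_ definition above) =====
theorem has_seven_spec : Claim_equal_has_seven := by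
  intro k _
  unfold Spec_has_seven has_seven_alt
  exact has_seven_eq_loop k.natAbs k rfl
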